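-- pv_equiv track=rewrite | github.com/Malta22v/TRABALHO-TR1 | CamadaEnlace.py | hamming_dinamico
-- ===== SOURCE A (Python) =====
-- def hamming_dinamico(bit_stream: list[int]) -> list[int]:
--     """
--     Implementação de Hamming com blocos de tamanho fixo.
--     Usa blocos de tamanho padrão: Hamming(7,4), (15,11), (31,26), (63,57)
--     Formato: (n, k) onde n = tamanho total, k = bits de dados
--     """
--     encoded = []
--     idx = 0
--     L = len(bit_stream)
--
--     # Configurações padrão: (tamanho_bloco, bits_dados, bits_paridade)
--     hamming_configs = [
--         (63, 57, 6),  # Hamming(63,57) - 6 bits de paridade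
--         (31, 26, 5),  # Hamming(31,26) - 5 bits de paridade
--         (15, 11, 4),  # Hamming(15,11) - 4 bits de paridade
--         (7, 4, 3),    # Hamming(7,4) - 3 bits de paridade
--     ]
--
--     while idx < L:
--         # Escolhe o maior bloco que cabe nos bits restantes
--         bits_restantes = L - idx
--         n, k, p = None, None, None
--
--         for config in hamming_configs:
--             if config[1] <= bits_restantes:
--                 n, k, p = config
--                 break
--
--         # Se nenhum bloco padrão cabe, usa o menor
--         if n is None:
--             n, k, p = 7, 4, 3
--
--         # Extrai k bits de dados (com padding se necessário)
--         data_bits = bit_stream[idx : idx + k]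
--         if len(data_bits) < k:
--             data_bits = data_bits + [0] * (k - len(data_bits))
--         idx += len(bit_stream[idx : idx + k])  # avança apenas pelos bits reais
--
--         # Cria bloco Hamming indexado a partir de 1
--         block = [None] * (n + 1)
--
--         # Posições de paridade: 1, 2, 4, 8, 16, 32
--         parity_positions = [2 ** i for i in range(p)]
--
--         # Preenche bits de dados nas posições não-paridade
--         data_idx = 0
--         for pos in range(1, n + 1):
--             if pos not in parity_positions:
--                 block[pos] = data_bits[data_idx] if data_idx < len(data_bits) else 0
--                 data_idx += 1
--
--         # Calcula bits de paridade
--         for parity_pos in parity_positions: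
--             xor_sum = 0
--             for pos in range(1, n + 1):
--                 # Se a posição tem o bit de paridade ativo
--                 if pos & parity_pos:
--                     if block[pos] is not None:
--                         xor_sum ^= block[pos]
--             block[parity_pos] = xor_sum
--
--         # Adiciona bloco ao resultado (ignorando índice 0)
--         encoded.extend(block[1:])
--
--     return encoded
-- ===== SOURCE B (Python) =====
-- def hamming_dinamico(bit_stream: list[int]) -> list[int]:
--     """Single fused pass per block: data placement and parity accumulation together."""
--     encoded = []
--     idx = 0
--     L = len(bit_stream)
--     while idx < L:
--         rem = L - idx
--         if rem >= 57:
--             n, k, p = 63, 57, 6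
--         elif rem >= 26:
--             n, k, p = 31, 26, 5
--         elif rem >= 11:
--             n, k, p = 15, 11, 4
--         else:
--             n, k, p = 7, 4, 3
--         take = k if k < rem else rem
--         vals = [0] * (n + 1)
--         acc = [0] * p
--         di = 0
--         for pos in range(1, n + 1):
--             if pos & (pos - 1):  # not a power of two: a data slot
--                 bit = bit_stream[idx + di] if di < take else 0
--                 vals[pos] = bit
--                 acc = [(a ^ bit) if pos & (1 << j) else a for a, j in zip(acc, range(p))]
--                 di += 1
--         for j in range(p):
--             vals[1 << j] = acc[j]
--         encoded.extend(vals[1:])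
--         idx += take
--     return encoded
-- ===== Notes on version B (the rewrite author's own statement) =====
-- stated objective: alternative
-- what changed: Per block, A fills the data slots first and then runs p separate full-width scans of the block (one per parity bit); B makes a single fused pass over positions 1..n that places each data bit and XORs it into all of its parity accumulators at once, then writes the accumulators into the power-of-two slots.
import Mathlib
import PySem

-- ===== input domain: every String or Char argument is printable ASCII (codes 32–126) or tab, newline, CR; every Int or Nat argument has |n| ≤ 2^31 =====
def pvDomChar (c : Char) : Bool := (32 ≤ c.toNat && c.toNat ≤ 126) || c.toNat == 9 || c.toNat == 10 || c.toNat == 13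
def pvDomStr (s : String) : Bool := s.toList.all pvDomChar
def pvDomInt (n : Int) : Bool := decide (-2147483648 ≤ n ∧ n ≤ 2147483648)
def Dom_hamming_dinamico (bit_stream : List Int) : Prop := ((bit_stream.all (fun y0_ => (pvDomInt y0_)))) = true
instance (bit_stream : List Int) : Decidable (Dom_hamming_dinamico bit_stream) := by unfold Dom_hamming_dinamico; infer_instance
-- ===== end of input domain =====

-- B replaces A's p separate full-width parity scans per block by one fused pass that places each
-- data bit and XORs it into every relevant parity accumulator at once (objective: alternative).

-- ===== PORT A =====
-- hamming_configs
def pvConfigs : List (Nat × Nat × Nat) := [(63, 57, 6), (31, 26, 5), (15, 11, 4), (7, 4, 3)]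

-- the 'for config in hamming_configs: if config[1] <= bits_restantes: break' search + fallback
def pvPickConfig (r : Nat) : Nat × Nat × Nat :=
  match pvConfigs.find? (fun c => decide (c.2.1 ≤ r)) with
  | some c => c
  | none => (7, 4, 3)

-- data_bits = bit_stream[idx:idx+k] padded with zeros to length k (rest = bit_stream[idx:])
def pvDataBits (rest : List Int) (k : Nat) : List Int :=
  (rest.take k) ++ List.replicate (k - (rest.take k).length) 0

-- 'data_bits[data_idx] if data_idx < len(data_bits) else 0'
def pvBitA (rest : List Int) (k : Nat) (i : Nat) : Int :=
  if i < (pvDataBits rest k).length then (pvDataBits rest k).getD i 0 else 0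

-- parity_positions = [2 ** i for i in range(p)]
def pvParityPositions (p : Nat) : List Nat := (List.range p).map (fun i => 2 ^ i)

-- body of A's data-placement loop: skip parity positions, else write the next data bit
def pvStepFill (bit : Nat → Int) (P : List Nat) (st : List (Option Int) × Nat) (pos : Nat) :
    List (Option Int) × Nat :=
  match st with
  | (blk, di) => if pos ∈ P then (blk, di) else (blk.set pos (some (bit di)), di + 1)

-- body of A's 'xor_sum' inner loop
def pvScanStep (blk : List (Option Int)) (ppos : Nat) (s : Int) (pos : Nat) : Int :=
  if pos &&& ppos ≠ 0 then
    match blk.getD pos none with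
    | some v => PySem.Int.bxor s v
    | none => s
  else s

-- A's 'xor_sum' loop over pos in range(1, n+1)
def pvScan (n ppos : Nat) (blk : List (Option Int)) : Int :=
  (List.range' 1 n).foldl (pvScanStep blk ppos) 0

-- one loop body of A: fill data slots, then one scan per parity position, return block[1:]
def pvBlockCoreA (bit : Nat → Int) (n p : Nat) : List Int :=
  let P := pvParityPositions p
  let fill := (List.range' 1 n).foldl (pvStepFill bit P) (List.replicate (n + 1) (none : Option Int), 0)
  let block := P.foldl (fun blk ppos => blk.set ppos (some (pvScan n ppos blk))) fill.1
  (block.drop 1).map (fun o => o.getD 0)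

-- needed by the termination argument of pvGoA below
theorem pvPickConfig_eq (r : Nat) :
    pvPickConfig r =
      if 57 ≤ r then (63, 57, 6) else if 26 ≤ r then (31, 26, 5)
      else if 11 ≤ r then (15, 11, 4) else (7, 4, 3) := by
  by_cases h1 : 57 ≤ r <;> by_cases h2 : 26 ≤ r <;> by_cases h3 : 11 ≤ r <;> by_cases h4 : 4 ≤ r <;>
    simp [pvPickConfig, pvConfigs, List.find?, h1, h2, h3, h4]

-- the while-loop of A over the remaining suffix of bit_stream
def pvGoA (rest : List Int) : List Int :=
  if h : rest.isEmpty then []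
  else
    let cfg := pvPickConfig rest.length
    let take := (rest.take cfg.2.1).length
    pvBlockCoreA (pvBitA rest cfg.2.1) cfg.1 cfg.2.2 ++ pvGoA (rest.drop take)
termination_by rest.length
decreasing_by
  have hr : rest.length ≠ 0 := by simpa [List.isEmpty_iff_length_eq_zero] using h
  have hk : 4 ≤ (pvPickConfig rest.length).2.1 := by
    rw [pvPickConfig_eq]; split_ifs <;> decide
  simp only [List.length_drop, List.length_take]
  omega

def hamming_dinamico (bit_stream : List Int) : List Int := pvGoA bit_stream

-- ===== PORT B =====
-- 'bit_stream[idx + di] if di < take else 0' (rest = bit_stream[idx:])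
def pvBitB (rest : List Int) (tk : Nat) (i : Nat) : Int :=
  if i < tk then rest.getD i 0 else 0

-- body of B's fused loop: on a data slot write the bit and fold it into every parity accumulator
def pvStepB (bit : Nat → Int) (st : List Int × List Int × Nat) (pos : Nat) :
    List Int × List Int × Nat :=
  match st with
  | (vals, acc, di) =>
    if pos &&& (pos - 1) ≠ 0 then
      let b := bit di
      (vals.set pos b,
       acc.zipIdx.map (fun aj =>
         match aj with
         | (a, j) => if pos &&& (1 <<< j) ≠ 0 then PySem.Int.bxor a b else a),
       di + 1)
    else (vals, acc, di)

-- one loop body of B: single fused pass, then write the accumulators into the power-of-two slots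
def pvBlockCoreB (bit : Nat → Int) (n p : Nat) : List Int :=
  let st := (List.range' 1 n).foldl (pvStepB bit)
    (List.replicate (n + 1) (0 : Int), List.replicate p (0 : Int), 0)
  match st with
  | (vals0, acc, _) =>
    ((List.range p).foldl (fun v j => v.set (1 <<< j) (acc.getD j 0)) vals0).drop 1

-- the while-loop of B over the remaining suffix
def pvGoB (rest : List Int) : List Int :=
  if h : rest.isEmpty then []
  else
    let r := rest.length
    let cfg := if 57 ≤ r then ((63 : Nat), (57 : Nat), (6 : Nat))
               else if 26 ≤ r then (31, 26, 5)
               else if 11 ≤ r then (15, 11, 4)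
               else (7, 4, 3)
    let tk := if cfg.2.1 < r then cfg.2.1 else r
    pvBlockCoreB (pvBitB rest tk) cfg.1 cfg.2.2 ++ pvGoB (rest.drop tk)
termination_by rest.length
decreasing_by
  have hr : rest.length ≠ 0 := by simpa [List.isEmpty_iff_length_eq_zero] using h
  simp only [List.length_drop]
  split_ifs <;> first | omega | (dsimp only; omega)

def hamming_dinamico_alt (bit_stream : List Int) : List Int := pvGoB bit_stream

-- ===== PRECONDITION & SPEC =====
def Spec_hamming_dinamico (bit_stream : List Int) (out : List Int) : Prop := out = hamming_dinamico_alt bit_stream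
instance (bit_stream : List Int) (out : List Int) : Decidable (Spec_hamming_dinamico bit_stream out) := by unfold Spec_hamming_dinamico; infer_instance

-- ===== CLAIM (what is proved, stated in full; the proofs are below) =====
def Claim_equal_hamming_dinamico : Prop := ∀ (bit_stream : List Int), Dom_hamming_dinamico bit_stream → Spec_hamming_dinamico bit_stream (hamming_dinamico bit_stream)

-- ===== LEMMAS AND PROOFS =====

-- state of A's fill loop after processing positions 1..m
def pvSA (bit : Nat → Int) (n p m : Nat) : List (Option Int) × Nat :=
  (List.range' 1 m).foldl (pvStepFill bit (pvParityPositions p))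
    (List.replicate (n + 1) (none : Option Int), 0)

-- state of B's fused loop after processing positions 1..m
def pvSB (bit : Nat → Int) (n p m : Nat) : List Int × List Int × Nat :=
  (List.range' 1 m).foldl (pvStepB bit)
    (List.replicate (n + 1) (0 : Int), List.replicate p (0 : Int), 0)

-- A's parity write-back after the first t parity positions
def pvPhase2A (n t : Nat) (blk0 : List (Option Int)) : List (Option Int) :=
  ((List.range t).map (fun i => 2 ^ i)).foldl
    (fun blk ppos => blk.set ppos (some (pvScan n ppos blk))) blk0

-- B's write-back after the first t accumulators
def pvPhase2B (t : Nat) (acc vals0 : List Int) : List Int :=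
  (List.range t).foldl (fun v j => v.set (1 <<< j) (acc.getD j 0)) vals0

theorem pvGetD_set_ne {α : Type} (l : List α) (i j : Nat) (v d : α) (h : i ≠ j) :
    (l.set j v).getD i d = l.getD i d := by
  rw [List.getD_eq_getElem?_getD, List.getElem?_set, if_neg (fun hc => h hc.symm),
    ← List.getD_eq_getElem?_getD]

theorem pvGetD_set_self {α : Type} (l : List α) (j : Nat) (v d : α) (h : j < l.length) :
    (l.set j v).getD j d = v := by
  rw [List.getD_eq_getElem?_getD, List.getElem?_set, if_pos rfl, if_pos h]; rfl

theorem pvScan_fold_id (blk : List (Option Int)) (ppos : Nat) (L : List Nat) (s : Int)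
    (h : ∀ q ∈ L, q &&& ppos = 0 ∨ blk.getD q none = none) :
    L.foldl (pvScanStep blk ppos) s = s := by
  induction L generalizing s with
  | nil => rfl
  | cons q L ih =>
    have hq := h q (by simp)
    have hs : pvScanStep blk ppos s q = s := by
      unfold pvScanStep
      rcases hq with hq | hq
      · simp [hq]
      · rw [hq]; split <;> rfl
    rw [List.foldl_cons, hs]
    exact ih _ (fun q hq2 => h q (by simp [hq2]))

theorem pvScan_congr (n ppos : Nat) (blk blk' : List (Option Int))
    (h : ∀ q, 1 ≤ q → q ≤ n → q &&& ppos ≠ 0 → blk.getD q none = blk'.getD q none) :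
    pvScan n ppos blk = pvScan n ppos blk' := by
  unfold pvScan
  apply PySem.List.foldl_congr_mem
  intro s q hq
  have hmem : 1 ≤ q ∧ q < 1 + n := by simpa [List.mem_range'_1] using hq
  unfold pvScanStep
  by_cases hb : q &&& ppos ≠ 0
  · rw [h q hmem.1 (by omega) hb]
  · simp [hb]

theorem pvStepFill_eq (bit : Nat → Int) (P : List Nat) (st : List (Option Int) × Nat) (pos : Nat) :
    pvStepFill bit P st pos =
      if pos ∈ P then st else (st.1.set pos (some (bit st.2)), st.2 + 1) := by
  rcases st with ⟨blk, di⟩; rfl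

theorem pvStepB_eq (bit : Nat → Int) (st : List Int × List Int × Nat) (pos : Nat) :
    pvStepB bit st pos =
      if pos &&& (pos - 1) ≠ 0 then
        (st.1.set pos (bit st.2.2),
         st.2.1.zipIdx.map (fun aj =>
           match aj with
           | (a, j) => if pos &&& (1 <<< j) ≠ 0 then PySem.Int.bxor a (bit st.2.2) else a),
         st.2.2 + 1)
      else st := by
  rcases st with ⟨vals, acc, di⟩
  rfl

theorem pvScan_split (pos n : Nat) (h1 : 1 ≤ pos) (h2 : pos ≤ n) :
    List.range' 1 n = List.range' 1 (pos - 1) ++ pos :: List.range' (pos + 1) (n - pos) := by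
  have h := List.range'_append (s := 1) (m := pos - 1) (n := n - (pos - 1)) (step := 1)
  have e1 : pos - 1 + (n - (pos - 1)) = n := by omega
  have e2 : 1 + 1 * (pos - 1) = pos := by omega
  have e3 : n - (pos - 1) = (n - pos) + 1 := by omega
  rw [e1, e2, e3, List.range'_succ] at h
  exact h.symm

theorem pvScan_set (n pos : Nat) (blk : List (Option Int)) (v : Int) (ppos : Nat)
    (h1 : 1 ≤ pos) (h2 : pos ≤ n) (hlen : blk.length = n + 1)
    (hnone : ∀ q, pos ≤ q → q ≤ n → blk.getD q none = none) :
    pvScan n ppos (blk.set pos (some v)) =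
      if pos &&& ppos ≠ 0 then PySem.Int.bxor (pvScan n ppos blk) v
      else pvScan n ppos blk := by
  have hget : ∀ q, q ≠ pos → (blk.set pos (some v)).getD q none = blk.getD q none := by
    intro q hq
    rw [List.getD_eq_getElem?_getD, List.getD_eq_getElem?_getD, List.getElem?_set,
      if_neg (fun hc => hq hc.symm)]
  have hpre : ∀ s, (List.range' 1 (pos - 1)).foldl (pvScanStep (blk.set pos (some v)) ppos) s
      = (List.range' 1 (pos - 1)).foldl (pvScanStep blk ppos) s := by
    intro s
    apply PySem.List.foldl_congr_mem
    intro acc q hq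
    have hmem : 1 ≤ q ∧ q < 1 + (pos - 1) := by simpa [List.mem_range'_1] using hq
    unfold pvScanStep
    rw [hget q (by omega)]
  have hsufnone : ∀ q ∈ List.range' (pos + 1) (n - pos), blk.getD q none = none := by
    intro q hq
    have hmem : pos + 1 ≤ q ∧ q < pos + 1 + (n - pos) := by simpa [List.mem_range'_1] using hq
    exact hnone q (by omega) (by omega)
  have hsuf : ∀ s, (List.range' (pos + 1) (n - pos)).foldl (pvScanStep (blk.set pos (some v)) ppos) s = s := by
    intro s
    apply pvScan_fold_id
    intro q hq
    have hmem : pos + 1 ≤ q ∧ q < pos + 1 + (n - pos) := by simpa [List.mem_range'_1] using hq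
    right
    rw [hget q (by omega)]
    exact hsufnone q hq
  have hsuf' : ∀ s, (List.range' (pos + 1) (n - pos)).foldl (pvScanStep blk ppos) s = s := by
    intro s
    apply pvScan_fold_id
    intro q hq
    exact Or.inr (hsufnone q hq)
  have hposget : (blk.set pos (some v)).getD pos none = some v := by
    rw [List.getD_eq_getElem?_getD, List.getElem?_set, if_pos rfl, if_pos (by omega)]; rfl
  have hposget0 : blk.getD pos none = none := hnone pos le_rfl h2
  unfold pvScan
  rw [pvScan_split pos n h1 h2, List.foldl_append, List.foldl_append, hpre,
    List.foldl_cons, List.foldl_cons, hsuf, hsuf']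
  unfold pvScanStep
  rw [hposget, hposget0]
  split <;> rfl

-- the main joint invariant of A's fill pass and B's fused pass
theorem pvInv (bit : Nat → Int) (n p : Nat)
    (hPP : ∀ pos, 1 ≤ pos → pos ≤ n → (pos ∈ pvParityPositions p ↔ pos &&& (pos - 1) = 0))
    (m : Nat) (hm : m ≤ n) :
    (pvSA bit n p m).2 = (pvSB bit n p m).2.2
    ∧ (pvSA bit n p m).1.length = n + 1
    ∧ (pvSB bit n p m).1.length = n + 1
    ∧ (pvSB bit n p m).2.1.length = p
    ∧ (∀ i, i = 0 ∨ m < i ∨ i &&& (i - 1) = 0 →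
        (pvSA bit n p m).1.getD i none = none ∧ (pvSB bit n p m).1.getD i 0 = 0)
    ∧ (∀ i, 1 ≤ i → i ≤ m → i &&& (i - 1) ≠ 0 →
        (pvSA bit n p m).1.getD i none = some ((pvSB bit n p m).1.getD i 0))
    ∧ (∀ j, j < p → (pvSB bit n p m).2.1.getD j 0 = pvScan n (2 ^ j) (pvSA bit n p m).1) := by
  induction m with
  | zero =>
    have hA : pvSA bit n p 0 = (List.replicate (n + 1) (none : Option Int), 0) := by
      simp [pvSA]
    have hB : pvSB bit n p 0 = (List.replicate (n + 1) (0 : Int), List.replicate p (0 : Int), 0) := by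
      simp [pvSB]
    rw [hA, hB]
    refine ⟨rfl, by simp, by simp, by simp, ?_, ?_, ?_⟩
    · intro i _
      constructor <;>
        (rw [List.getD_eq_getElem?_getD]; rw [List.getElem?_replicate]; split <;> rfl)
    · intro i h1 h2 _; omega
    · intro j hj
      have hz : pvScan n (2 ^ j) (List.replicate (n + 1) (none : Option Int)) = 0 := by
        apply pvScan_fold_id
        intro q hq
        right
        rw [List.getD_eq_getElem?_getD, List.getElem?_replicate]
        split <;> rfl
      rw [hz, List.getD_eq_getElem?_getD, List.getElem?_replicate]
      split <;> rfl
  | succ m ih =>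
    have hm' : m ≤ n := by omega
    obtain ⟨ih1, ih2, ih3, ih4, ih5, ih6, ih7⟩ := ih hm'
    have hconcat : List.range' 1 (m + 1) = List.range' 1 m ++ [1 + m] := List.range'_1_concat
    have hSA : pvSA bit n p (m + 1)
        = pvStepFill bit (pvParityPositions p) (pvSA bit n p m) (1 + m) := by
      unfold pvSA; rw [hconcat, List.foldl_append]; rfl
    have hSB : pvSB bit n p (m + 1) = pvStepB bit (pvSB bit n p m) (1 + m) := by
      unfold pvSB; rw [hconcat, List.foldl_append]; rfl
    have h1m : (1 : Nat) + m = m + 1 := by omega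
    rw [hSA, hSB, h1m, pvStepFill_eq, pvStepB_eq]
    by_cases hpow : (m + 1) &&& (m + 1 - 1) = 0
    · have hmem : (m + 1) ∈ pvParityPositions p := (hPP (m + 1) (by omega) (by omega)).2 hpow
      rw [if_pos hmem, if_neg (by simpa using hpow)]
      refine ⟨ih1, ih2, ih3, ih4, ?_, ?_, ih7⟩
      · intro i hi
        apply ih5
        rcases hi with h | h | h
        · exact Or.inl h
        · by_cases him : i = m + 1
          · subst him; exact Or.inr (Or.inr hpow)
          · exact Or.inr (Or.inl (by omega))
        · exact Or.inr (Or.inr h)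
      · intro i hi1 hi2 hi3
        apply ih6 i hi1 ?_ hi3
        by_cases him : i = m + 1
        · exfalso; subst him; exact hi3 hpow
        · omega
    · have hmem : (m + 1) ∉ pvParityPositions p :=
        fun hc => hpow ((hPP (m + 1) (by omega) (by omega)).1 hc)
      rw [if_neg hmem, if_pos (by simpa using hpow)]
      have hset_ne_A : ∀ i, i ≠ m + 1 →
          ((pvSA bit n p m).1.set (m + 1) (some (bit (pvSA bit n p m).2))).getD i none
            = (pvSA bit n p m).1.getD i none := by
        intro i hne
        rw [List.getD_eq_getElem?_getD, List.getElem?_set, if_neg (fun hc => hne hc.symm),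
          ← List.getD_eq_getElem?_getD]
      have hset_ne_B : ∀ i, i ≠ m + 1 →
          ((pvSB bit n p m).1.set (m + 1) (bit (pvSB bit n p m).2.2)).getD i 0
            = (pvSB bit n p m).1.getD i 0 := by
        intro i hne
        rw [List.getD_eq_getElem?_getD, List.getElem?_set, if_neg (fun hc => hne hc.symm),
          ← List.getD_eq_getElem?_getD]
      refine ⟨by simp [ih1], by simp [List.length_set, ih2], by simp [List.length_set, ih3],
        by simp [List.length_map, List.length_zipIdx, ih4], ?_, ?_, ?_⟩
      · intro i hi
        have hne : i ≠ m + 1 := by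
          intro he
          rcases hi with h | h | h
          · omega
          · omega
          · subst he; exact hpow h
        have hi' : i = 0 ∨ m < i ∨ i &&& (i - 1) = 0 := by
          rcases hi with h | h | h
          · exact Or.inl h
          · exact Or.inr (Or.inl (by omega))
          · exact Or.inr (Or.inr h)
        exact ⟨by rw [hset_ne_A i hne]; exact (ih5 i hi').1,
          by rw [hset_ne_B i hne]; exact (ih5 i hi').2⟩
      · intro i hi1 hi2 hi3
        by_cases him : i = m + 1
        · subst him
          have hltA : m + 1 < (pvSA bit n p m).1.length := by omega
          have hltB : m + 1 < (pvSB bit n p m).1.length := by omega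
          show ((pvSA bit n p m).1.set (m + 1) (some (bit (pvSA bit n p m).2))).getD (m + 1) none
            = some (((pvSB bit n p m).1.set (m + 1) (bit (pvSB bit n p m).2.2)).getD (m + 1) 0)
          rw [List.getD_eq_getElem?_getD, List.getElem?_set, if_pos rfl, if_pos hltA,
            List.getD_eq_getElem?_getD, List.getElem?_set, if_pos rfl, if_pos hltB]
          simp [ih1]
        · rw [show ((pvSA bit n p m).1.set (m + 1) (some (bit (pvSA bit n p m).2))).getD i none
              = (pvSA bit n p m).1.getD i none from hset_ne_A i him,
            show ((pvSB bit n p m).1.set (m + 1) (bit (pvSB bit n p m).2.2)).getD i 0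
              = (pvSB bit n p m).1.getD i 0 from hset_ne_B i him]
          exact ih6 i hi1 (by omega) hi3
      · intro j hj
        have hjlen : j < (pvSB bit n p m).2.1.length := by rw [ih4]; exact hj
        have hlhs : ((pvSB bit n p m).2.1.zipIdx.map (fun aj =>
              match aj with
              | (a, j') => if (m + 1) &&& (1 <<< j') ≠ 0 then
                  PySem.Int.bxor a (bit (pvSB bit n p m).2.2) else a)).getD j 0
            = (if (m + 1) &&& (2 ^ j) ≠ 0 then
                PySem.Int.bxor ((pvSB bit n p m).2.1.getD j 0) (bit (pvSB bit n p m).2.2)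
              else (pvSB bit n p m).2.1.getD j 0) := by
          rw [List.getD_eq_getElem?_getD, List.getElem?_map, List.getElem?_zipIdx,
            List.getElem?_eq_getElem hjlen]
          simp only [Option.map_some, Option.getD_some, Nat.zero_add, Nat.one_shiftLeft]
          rw [List.getD_eq_getElem?_getD, List.getElem?_eq_getElem hjlen]
          rfl
        have hrhs : pvScan n (2 ^ j) ((pvSA bit n p m).1.set (m + 1) (some (bit (pvSA bit n p m).2)))
            = (if (m + 1) &&& (2 ^ j) ≠ 0 then
                PySem.Int.bxor (pvScan n (2 ^ j) (pvSA bit n p m).1) (bit (pvSA bit n p m).2)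
              else pvScan n (2 ^ j) (pvSA bit n p m).1) := by
          apply pvScan_set n (m + 1) (pvSA bit n p m).1 (bit (pvSA bit n p m).2) (2 ^ j)
            (by omega) (by omega) ih2
          intro q hq1 hq2
          exact (ih5 q (Or.inr (Or.inl (by omega)))).1
        show ((pvSB bit n p m).2.1.zipIdx.map _).getD j 0 = _
        rw [hlhs, hrhs, ih7 j hj, ih1]
  

-- the write-back phase: A's parity scans over the finished array produce exactly B's accumulators
theorem pvPhase2 (n p : Nat) (blk0 : List (Option Int)) (vals0 acc : List Int)
    (hA : blk0.length = n + 1) (hB : vals0.length = n + 1)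
    (hpj : ∀ j, j < p → 1 ≤ 2 ^ j ∧ 2 ^ j ≤ n)
    (hscan : ∀ j, j < p → acc.getD j 0 = pvScan n (2 ^ j) blk0)
    (t : Nat) (ht : t ≤ p) :
    (pvPhase2A n t blk0).length = n + 1
    ∧ (pvPhase2B t acc vals0).length = n + 1
    ∧ (∀ i, (∀ j, j < t → i ≠ 2 ^ j) →
        (pvPhase2A n t blk0).getD i none = blk0.getD i none
        ∧ (pvPhase2B t acc vals0).getD i 0 = vals0.getD i 0)
    ∧ (∀ j, j < t →
        (pvPhase2A n t blk0).getD (2 ^ j) none = some (acc.getD j 0)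
        ∧ (pvPhase2B t acc vals0).getD (2 ^ j) 0 = acc.getD j 0) := by
  induction t with
  | zero =>
    refine ⟨by simpa [pvPhase2A] using hA, by simpa [pvPhase2B] using hB, ?_, by omega⟩
    intro i _
    exact ⟨by simp [pvPhase2A], by simp [pvPhase2B]⟩
  | succ t ih =>
    obtain ⟨ih1, ih2, ih3, ih4⟩ := ih (by omega)
    have hA1 : pvPhase2A n (t + 1) blk0
        = (pvPhase2A n t blk0).set (2 ^ t) (some (pvScan n (2 ^ t) (pvPhase2A n t blk0))) := by
      unfold pvPhase2A
      rw [List.range_succ, List.map_append, List.foldl_append]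
      rfl
    have hB1 : pvPhase2B (t + 1) acc vals0
        = (pvPhase2B t acc vals0).set (1 <<< t) (acc.getD t 0) := by
      unfold pvPhase2B
      rw [List.range_succ, List.foldl_append]
      rfl
    have hpowne : ∀ j : Nat, j ≠ t → (2 : Nat) ^ j ≠ 2 ^ t := by
      intro j hj hc
      exact hj (Nat.pow_right_injective (le_refl 2) hc)
    have hscanA : pvScan n (2 ^ t) (pvPhase2A n t blk0) = pvScan n (2 ^ t) blk0 := by
      apply pvScan_congr
      intro q hq1 hq2 hq3
      apply (ih3 q ?_).1
      intro j hjt hqj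
      subst hqj
      have hne : j ≠ t := by omega
      have hjz : (2 : Nat) ^ j &&& 2 ^ t = 0 := by
        simp [Nat.and_two_pow, hne]
      exact hq3 hjz
    have hval : pvScan n (2 ^ t) (pvPhase2A n t blk0) = acc.getD t 0 := by
      rw [hscanA, hscan t (by omega)]
    rw [hA1, hB1, Nat.one_shiftLeft, hval]
    have hlt2A : (2 : Nat) ^ t < (pvPhase2A n t blk0).length := by
      rw [ih1]; have := (hpj t (by omega)).2; omega
    have hlt2B : (2 : Nat) ^ t < (pvPhase2B t acc vals0).length := by
      rw [ih2]; have := (hpj t (by omega)).2; omega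
    refine ⟨by simp [List.length_set, ih1], by simp [List.length_set, ih2], ?_, ?_⟩
    · intro i hi
      have hne : i ≠ 2 ^ t := hi t (by omega)
      rw [pvGetD_set_ne _ _ _ _ _ hne, pvGetD_set_ne _ _ _ _ _ hne]
      exact ih3 i (fun j hj => hi j (by omega))
    · intro j hj
      by_cases hjt : j = t
      · subst hjt
        rw [pvGetD_set_self _ _ _ _ hlt2A, pvGetD_set_self _ _ _ _ hlt2B]
        exact ⟨rfl, rfl⟩
      · have hne : (2 : Nat) ^ j ≠ 2 ^ t := hpowne j hjt
        rw [pvGetD_set_ne _ _ _ _ _ hne, pvGetD_set_ne _ _ _ _ _ hne]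
        exact ih4 j (by omega)

theorem pvBlockCore_eq (bit : Nat → Int) (n p : Nat)
    (hPP : ∀ pos, 1 ≤ pos → pos ≤ n → (pos ∈ pvParityPositions p ↔ pos &&& (pos - 1) = 0))
    (hpj : ∀ j, j < p → 1 ≤ 2 ^ j ∧ 2 ^ j ≤ n)
    (hpow : ∀ pos, 1 ≤ pos → pos ≤ n → pos &&& (pos - 1) = 0 → ∃ j, j < p ∧ pos = 2 ^ j) :
    pvBlockCoreA bit n p = pvBlockCoreB bit n p := by
  obtain ⟨i1, i2, i3, i4, i5, i6, i7⟩ := pvInv bit n p hPP n le_rfl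
  have hAexpr : pvBlockCoreA bit n p
      = ((pvPhase2A n p (pvSA bit n p n).1).drop 1).map (fun o => o.getD 0) := rfl
  have hBexpr : pvBlockCoreB bit n p
      = (pvPhase2B p (pvSB bit n p n).2.1 (pvSB bit n p n).1).drop 1 := rfl
  obtain ⟨p1, p2, p3, p4⟩ := pvPhase2 n p (pvSA bit n p n).1 (pvSB bit n p n).1
    (pvSB bit n p n).2.1 i2 i3 hpj i7 p le_rfl
  rw [hAexpr, hBexpr]
  apply List.ext_getElem?
  intro i
  rw [List.getElem?_map, List.getElem?_drop, List.getElem?_drop]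
  by_cases hi : i < n
  · have hiA : 1 + i < (pvPhase2A n p (pvSA bit n p n).1).length := by rw [p1]; omega
    have hiB : 1 + i < (pvPhase2B p (pvSB bit n p n).2.1 (pvSB bit n p n).1).length := by
      rw [p2]; omega
    rw [List.getElem?_eq_getElem hiA, List.getElem?_eq_getElem hiB]
    simp only [Option.map_some]
    refine congrArg some ?_
    have eA : (pvPhase2A n p (pvSA bit n p n).1)[1 + i]
        = (pvPhase2A n p (pvSA bit n p n).1).getD (1 + i) none := by
      rw [List.getD_eq_getElem?_getD, List.getElem?_eq_getElem hiA]; rfl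
    have eB : (pvPhase2B p (pvSB bit n p n).2.1 (pvSB bit n p n).1)[1 + i]
        = (pvPhase2B p (pvSB bit n p n).2.1 (pvSB bit n p n).1).getD (1 + i) 0 := by
      rw [List.getD_eq_getElem?_getD, List.getElem?_eq_getElem hiB]; rfl
    rw [eA, eB]
    by_cases hp2 : (1 + i) &&& (1 + i - 1) = 0
    · obtain ⟨j, hj, hje⟩ := hpow (1 + i) (by omega) (by omega) hp2
      rw [hje, (p4 j hj).1, (p4 j hj).2]
      rfl
    · have hne : ∀ j, j < p → 1 + i ≠ 2 ^ j := by
        intro j hj hc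
        apply hp2
        rw [hc]
        have hmem : (2 : Nat) ^ j ∈ pvParityPositions p := by
          unfold pvParityPositions
          exact List.mem_map.2 ⟨j, List.mem_range.2 hj, rfl⟩
        exact (hPP _ (hpj j hj).1 (hpj j hj).2).1 hmem
      rw [(p3 (1 + i) hne).1, (p3 (1 + i) hne).2]
      rw [i6 (1 + i) (by omega) (by omega) hp2]
      rfl
  · have hA0 : (pvPhase2A n p (pvSA bit n p n).1)[1 + i]? = none := by
      apply List.getElem?_eq_none
      rw [p1]; omega
    have hB0 : (pvPhase2B p (pvSB bit n p n).2.1 (pvSB bit n p n).1)[1 + i]? = none := by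
      apply List.getElem?_eq_none
      rw [p2]; omega
    rw [hA0, hB0]
    rfl

theorem pvBit_eq (rest : List Int) (k : Nat) :
    pvBitA rest k = pvBitB rest (min k rest.length) := by
  funext i
  have hlt : (rest.take k).length = min k rest.length := List.length_take
  unfold pvBitA pvBitB pvDataBits
  by_cases hi : i < min k rest.length
  · have hik : i < k := lt_of_lt_of_le hi (min_le_left _ _)
    have h1 : i < (List.take k rest).length := by omega
    rw [if_pos hi, if_pos (by simp [List.length_append, hlt]; omega)]
    rw [List.getD_eq_getElem?_getD, List.getElem?_append_left h1, List.getD_eq_getElem?_getD,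
      List.getElem?_take_of_lt hik]
  · rw [if_neg hi]
    by_cases hik : i < k
    · rw [if_pos (by simp [List.length_append, hlt]; omega)]
      rw [List.getD_eq_getElem?_getD, List.getElem?_append_right (by omega)]
      simp only [List.getElem?_replicate]
      split <;> simp
    · rw [if_neg (by simp [List.length_append, hlt]; omega)]

theorem pvBlockCore_eq_7 (b : Nat → Int) : pvBlockCoreA b 7 3 = pvBlockCoreB b 7 3 :=
  pvBlockCore_eq b 7 3 (by decide) (by decide) (by decide)
theorem pvBlockCore_eq_15 (b : Nat → Int) : pvBlockCoreA b 15 4 = pvBlockCoreB b 15 4 :=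
  pvBlockCore_eq b 15 4 (by decide) (by decide) (by decide)
theorem pvBlockCore_eq_31 (b : Nat → Int) : pvBlockCoreA b 31 5 = pvBlockCoreB b 31 5 :=
  pvBlockCore_eq b 31 5 (by decide) (by decide) (by decide)
theorem pvBlockCore_eq_63 (b : Nat → Int) : pvBlockCoreA b 63 6 = pvBlockCoreB b 63 6 :=
  pvBlockCore_eq b 63 6 (by decide) (by decide) (by decide)

theorem pvGo_eq (rest : List Int) : pvGoA rest = pvGoB rest := by
  rw [pvGoA, pvGoB]
  by_cases h : rest.isEmpty
  · simp [h]
  · rw [dif_neg h, dif_neg h]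
    rw [pvPickConfig_eq]
    have hr : rest.length ≠ 0 := by simpa [List.isEmpty_iff_length_eq_zero] using h
    have htk : ∀ k : Nat, (rest.take k).length = (if k < rest.length then k else rest.length) := by
      intro k; rw [List.length_take]; split_ifs <;> omega
    have hmin : ∀ k : Nat, (if k < rest.length then k else rest.length) = min k rest.length := by
      intro k; split_ifs <;> omega
    by_cases h1 : 57 ≤ rest.length <;> by_cases h2 : 26 ≤ rest.length <;>
      by_cases h3 : 11 ≤ rest.length <;>
      simp only [h1, h2, h3, if_true, if_false, htk] <;>
      first
        | (exfalso; omega)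
        | (rw [hmin, pvBit_eq, pvBlockCore_eq_63, pvGo_eq])
        | (rw [hmin, pvBit_eq, pvBlockCore_eq_31, pvGo_eq])
        | (rw [hmin, pvBit_eq, pvBlockCore_eq_15, pvGo_eq])
        | (rw [hmin, pvBit_eq, pvBlockCore_eq_7, pvGo_eq])
termination_by rest.length
decreasing_by
  all_goals (simp only [List.length_drop]; omega)

-- ===== VERDICT (by name: the statement is the Claim_ definition above) =====
theorem hamming_dinamico_spec : Claim_equal_hamming_dinamico := by
  intro bs _
  unfold Spec_hamming_dinamico hamming_dinamico hamming_dinamico_alt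
  exact pvGo_eq bs
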